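-- pv_equiv track=rewrite | github.com/dvicofirn/Concurrent-Action-Realm-for-Resource-Iterations | CARRITranslator.py | split_key_vars
-- ===== SOURCE A (Python) =====
-- def split_key_vars(parts_list):
--     """
--     Splits the parts list into two separate lists: one for the items at odd indexes and one for the even indexes.
--     """
--     key_vars_odd = []
--     key_vars_even = []
--
--     for i in range(0, len(parts_list), 2):
--         if parts_list[i].startswith("("):
--             break
--         key_vars_odd.append(parts_list[i])
--         if i + 1 < len(parts_list):
--             key_vars_even.append(parts_list[i + 1])
--
--     return tuple(key_vars_odd), tuple(key_vars_even)
-- ===== SOURCE B (Python) =====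
-- def split_key_vars(parts_list):
--     """
--     Splits the parts list into two separate lists: one for the items at odd indexes and one for the even indexes.
--     """
--     n = len(parts_list)
--     c = next((i for i in range(0, n, 2) if parts_list[i].startswith("(")), n)
--     return tuple(parts_list[0:c:2]), tuple(parts_list[1:c:2])
-- ===== Notes on version B (the rewrite author's own statement) =====
-- stated objective: simpler
-- what changed: Replaces the accumulating loop with per-pair appends and an i+1<len guard by a single scan for the cutoff index followed by two step-2 slices that build both tuples at once.
import Mathlib
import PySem

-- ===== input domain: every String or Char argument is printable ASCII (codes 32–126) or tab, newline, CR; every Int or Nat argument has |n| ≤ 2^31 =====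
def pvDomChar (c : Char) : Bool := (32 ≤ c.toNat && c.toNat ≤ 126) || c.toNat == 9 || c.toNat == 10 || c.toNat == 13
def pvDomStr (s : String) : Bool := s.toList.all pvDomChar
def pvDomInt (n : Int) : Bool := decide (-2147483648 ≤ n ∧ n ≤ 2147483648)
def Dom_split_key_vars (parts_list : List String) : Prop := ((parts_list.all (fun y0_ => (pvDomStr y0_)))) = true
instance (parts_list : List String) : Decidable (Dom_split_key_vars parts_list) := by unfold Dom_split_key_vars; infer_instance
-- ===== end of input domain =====

-- B replaces A's accumulating loop (per-pair appends with an i+1<len guard) by one cutoff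
-- scan plus two step-2 slices; objective: simpler. Equivalence proved on all inputs (A is total).

-- ===== PORT A =====
-- A's for-loop over range(0, len, 2): each iteration reads xs[i] (the list head here) and,
-- when i+1 < len, xs[i+1] (the head of the rest), accumulating into odd/even by append.
def pvGoA : List String → List String → List String → List String × List String
  | [], kOdd, kEven => (kOdd, kEven)
  | x :: rest, kOdd, kEven =>
    if PySem.Str.startswith x "(" then (kOdd, kEven)
    else
      match rest with
      | [] => (kOdd ++ [x], kEven)                       -- i + 1 < len fails: no even partner
      | y :: rest' => pvGoA rest' (kOdd ++ [x]) (kEven ++ [y])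

def split_key_vars (parts_list : List String) : List String × List String :=
  pvGoA parts_list [] []

-- ===== PORT B =====
-- cutoff c = first even index whose element startswith "(", defaulting to len (Source B's `next(...)`)
def pvCutB : List String → Nat
  | [] => 0
  | x :: rest =>
    if PySem.Str.startswith x "(" then 0
    else
      match rest with
      | [] => 1
      | _ :: rest' => 2 + pvCutB rest'

-- step-2 slice xs[::2] over nonnegative bounds (PySem.List.slice has no step); exact for Source B's use
def pvEveryOther : List String → List String
  | [] => []
  | [x] => [x]
  | x :: _ :: rest => x :: pvEveryOther rest

def split_key_vars_alt (parts_list : List String) : List String × List String :=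
  let c := pvCutB parts_list
  (pvEveryOther (parts_list.take c),                       -- parts_list[0:c:2]
   pvEveryOther ((parts_list.drop 1).take (c - 1)))        -- parts_list[1:c:2]

-- ===== PRECONDITION & SPEC =====
def Spec_split_key_vars (parts_list : List String) (out : List String × List String) : Prop := out = split_key_vars_alt parts_list
instance (parts_list : List String) (out : List String × List String) : Decidable (Spec_split_key_vars parts_list out) := by unfold Spec_split_key_vars; infer_instance

-- ===== CLAIM (what is proved, stated in full; the proofs are below) =====
def Claim_equal_split_key_vars : Prop := ∀ (parts_list : List String), Dom_split_key_vars parts_list → Spec_split_key_vars parts_list (split_key_vars parts_list)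

-- ===== LEMMAS AND PROOFS =====

theorem pvEveryOther_cons (y : String) (l : List String) :
    pvEveryOther (y :: l) = y :: pvEveryOther (l.drop 1) := by
  cases l <;> simp [pvEveryOther]

theorem alt_nil : split_key_vars_alt [] = ([], []) := rfl

theorem alt_single (x : String) :
    split_key_vars_alt [x] =
      if PySem.Str.startswith x "(" then ([], []) else ([x], []) := by
  simp only [split_key_vars_alt, pvCutB]
  split <;> simp [pvEveryOther]

theorem alt_cons2 (x y : String) (r : List String) :
    split_key_vars_alt (x :: y :: r) =
      if PySem.Str.startswith x "(" then ([], [])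
      else (x :: (split_key_vars_alt r).1, y :: (split_key_vars_alt r).2) := by
  simp only [split_key_vars_alt, pvCutB]
  split
  · simp [pvEveryOther]
  · have h2 : 2 + pvCutB r = pvCutB r + 2 := by omega
    have h1 : pvCutB r + 2 - 1 = pvCutB r + 1 := by omega
    rw [h2, h1]
    simp only [List.take_succ_cons, List.drop_succ_cons, List.drop_zero, pvEveryOther]
    rw [pvEveryOther_cons, List.drop_take]

theorem pvGoA_eq : ∀ (xs kOdd kEven : List String),
    pvGoA xs kOdd kEven =
      (kOdd ++ (split_key_vars_alt xs).1, kEven ++ (split_key_vars_alt xs).2)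
  | [], kOdd, kEven => by simp [pvGoA, alt_nil]
  | [x], kOdd, kEven => by
    rw [alt_single]
    simp only [pvGoA]
    split <;> simp
  | x :: y :: r, kOdd, kEven => by
    rw [alt_cons2]
    simp only [pvGoA]
    split
    · simp
    · rw [pvGoA_eq r]
      simp

-- ===== VERDICT (by name: the statement is the Claim_ definition above) =====
theorem split_key_vars_spec : Claim_equal_split_key_vars := by
  intro xs _
  unfold Spec_split_key_vars split_key_vars
  rw [pvGoA_eq]
  simp
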